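-- pv_equiv track=rewrite | github.com/sl-633/enr-recognizer | src/datasets/macoir.py | micro_counts
-- ===== SOURCE A (Python) =====
-- from typing import Any, Dict, Iterable, List, Optional, Tuple
--
-- def micro_counts(per_doc: Dict[str, dict]) -> Tuple[int, int, int]:
--     tp = fp = fn = 0
--     for _, v in per_doc.items():
--         gold = v.get("gold", [])
--         pred = v.get("pred", [])
--         g = {str(x.get("id", "")) for x in gold if isinstance(x, dict) and x.get("id")}
--         p = {str(x.get("id", "")) for x in pred if isinstance(x, dict) and x.get("id")}
--         tp += len(p & g)
--         fp += len(p - g)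
--         fn += len(g - p)
--     return tp, fp, fn
-- ===== SOURCE B (Python) =====
-- from typing import Dict, Tuple
--
-- def micro_counts(per_doc: Dict[str, dict]) -> Tuple[int, int, int]:
--     tp = fp = fn = 0
--     for v in per_doc.values():
--         gs = sorted({str(x.get("id", "")) for x in v.get("gold", []) if isinstance(x, dict) and x.get("id")})
--         ps = sorted({str(x.get("id", "")) for x in v.get("pred", []) if isinstance(x, dict) and x.get("id")})
--         # two-pointer merge of the two sorted distinct-id lists
--         i = j = 0
--         while i < len(gs) and j < len(ps):
--             if gs[i] == ps[j]:
--                 tp += 1; i += 1; j += 1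
--             elif gs[i] < ps[j]:
--                 fn += 1; i += 1
--             else:
--                 fp += 1; j += 1
--         fn += len(gs) - i
--         fp += len(ps) - j
--     return tp, fp, fn
-- ===== Notes on version B (the rewrite author's own statement) =====
-- stated objective: alternative
-- what changed: Per document, instead of hashing into two sets and taking the three set operations |p&g|, |p-g|, |g-p|, B sorts the distinct gold ids and distinct pred ids and classifies every id as tp/fp/fn in one two-pointer merge over the two sorted lists.
import Mathlib
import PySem

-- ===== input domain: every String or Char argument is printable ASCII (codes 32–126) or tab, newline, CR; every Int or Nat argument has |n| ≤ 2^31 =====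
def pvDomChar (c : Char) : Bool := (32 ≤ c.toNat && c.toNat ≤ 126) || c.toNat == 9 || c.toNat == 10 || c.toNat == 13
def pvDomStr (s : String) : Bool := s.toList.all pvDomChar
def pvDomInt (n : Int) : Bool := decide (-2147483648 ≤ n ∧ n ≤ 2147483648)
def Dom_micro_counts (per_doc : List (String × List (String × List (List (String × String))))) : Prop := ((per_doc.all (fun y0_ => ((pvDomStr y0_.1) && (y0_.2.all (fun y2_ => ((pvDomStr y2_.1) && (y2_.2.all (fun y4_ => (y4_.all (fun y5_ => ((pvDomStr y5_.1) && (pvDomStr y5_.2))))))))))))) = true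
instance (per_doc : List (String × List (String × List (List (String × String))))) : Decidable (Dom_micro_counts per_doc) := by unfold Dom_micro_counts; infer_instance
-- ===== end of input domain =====

-- B replaces A's hashed sets with their three set operations by sorting the distinct gold and
-- pred ids and classifying every id as tp/fp/fn in one two-pointer merge (alternative algorithm).

-- ===== PORT A =====
-- x.get("id") is truthy iff the looked-up id string is present and nonempty; str() of a str is itself
def pvKeep (x : List (String × String)) : Bool := (PySem.Dict.ofList x).getD "id" "" ≠ ""
def pvId (x : List (String × String)) : String := (PySem.Dict.ofList x).getD "id" ""

def micro_counts (per_doc : List (String × List (String × List (List (String × String))))) : Int × Int × Int :=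
  (PySem.Dict.ofList per_doc).items.foldl
    (fun acc kv =>
      let v := PySem.Dict.ofList kv.2
      let gold := v.getD "gold" []
      let pred := v.getD "pred" []
      -- set comprehension: {str(x.get("id","")) for x in gold if isinstance(x, dict) and x.get("id")}
      let g : PySem.Set String := PySem.Set.ofList ((gold.filter pvKeep).map pvId)
      let p : PySem.Set String := PySem.Set.ofList ((pred.filter pvKeep).map pvId)
      (acc.1 + PySem.Set.len (PySem.Set.inter p g),
       acc.2.1 + PySem.Set.len (PySem.Set.diff p g),
       acc.2.2 + PySem.Set.len (PySem.Set.diff g p)))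
    (0, 0, 0)

-- ===== PORT B =====
-- B's while loop over the two sorted lists, as the obvious structural recursion on the two
-- suffixes gs[i:], ps[j:]; the trailing 'fn += len(gs)-i; fp += len(ps)-j' are the base cases.
def pvMerge : List String → List String → Int × Int × Int
  | [], ps => (0, (ps.length : Int), 0)
  | a :: gs, [] => (0, 0, ((a :: gs).length : Int))
  | a :: gs, b :: ps =>
      if a = b then
        let r := pvMerge gs ps
        (r.1 + 1, r.2.1, r.2.2)
      else if a < b then
        let r := pvMerge gs (b :: ps)
        (r.1, r.2.1, r.2.2 + 1)
      else
        let r := pvMerge (a :: gs) ps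
        (r.1, r.2.1 + 1, r.2.2)
termination_by gs ps => gs.length + ps.length

def micro_counts_alt (per_doc : List (String × List (String × List (List (String × String))))) : Int × Int × Int :=
  (PySem.Dict.ofList per_doc).items.foldl
    (fun acc kv =>
      let v := PySem.Dict.ofList kv.2
      let gs := PySem.List.sorted (PySem.Set.ofList (((v.getD "gold" []).filter pvKeep).map pvId)) (fun x => x) false
      let ps := PySem.List.sorted (PySem.Set.ofList (((v.getD "pred" []).filter pvKeep).map pvId)) (fun x => x) false
      let r := pvMerge gs ps
      (acc.1 + r.1, acc.2.1 + r.2.1, acc.2.2 + r.2.2))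
    (0, 0, 0)

-- ===== PRECONDITION & SPEC =====
def Spec_micro_counts (per_doc : List (String × List (String × List (List (String × String))))) (out : Int × Int × Int) : Prop := out = micro_counts_alt per_doc
instance (per_doc : List (String × List (String × List (List (String × String))))) (out : Int × Int × Int) : Decidable (Spec_micro_counts per_doc out) := by unfold Spec_micro_counts; infer_instance

-- ===== CLAIM (what is proved, stated in full; the proofs are below) =====
def Claim_equal_micro_counts : Prop := ∀ (per_doc : List (String × List (String × List (List (String × String))))), Dom_micro_counts per_doc → Spec_micro_counts per_doc (micro_counts per_doc)

-- ===== LEMMAS AND PROOFS =====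

-- the merge of two strictly increasing lists counts common / pred-only / gold-only elements
lemma pvMerge_counts (gs ps : List String) :
    gs.Pairwise (· < ·) → ps.Pairwise (· < ·) →
    pvMerge gs ps = ((ps.countP (fun x => decide (x ∈ gs)) : Int),
                     (ps.countP (fun x => !decide (x ∈ gs)) : Int),
                     (gs.countP (fun x => !decide (x ∈ ps)) : Int)) := by
  induction gs, ps using pvMerge.induct with
  | case1 ps => intro _ _; simp [pvMerge]
  | case2 a gs => intro _ _; simp [pvMerge]
  | case3 gs b ps ih =>
    intro hg hp
    have hgb : ∀ x ∈ gs, b < x := (List.pairwise_cons.mp hg).1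
    have hpb : ∀ x ∈ ps, b < x := (List.pairwise_cons.mp hp).1
    have h1 : ps.countP (fun x => decide (x = b) || decide (x ∈ gs))
        = ps.countP (fun x => decide (x ∈ gs)) :=
      List.countP_congr (fun x hx => by simp [(hpb x hx).ne'])
    have h2 : ps.countP (fun x => !decide (x = b) && !decide (x ∈ gs))
        = ps.countP (fun x => !decide (x ∈ gs)) :=
      List.countP_congr (fun x hx => by simp [(hpb x hx).ne'])
    have h3 : gs.countP (fun x => !decide (x = b) && !decide (x ∈ ps))
        = gs.countP (fun x => !decide (x ∈ ps)) :=
      List.countP_congr (fun x hx => by simp [(hgb x hx).ne'])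
    simp only [pvMerge, ih (List.pairwise_cons.mp hg).2 (List.pairwise_cons.mp hp).2]
    simp [Prod.ext_iff]
    exact ⟨h1.symm, h2.symm, h3.symm⟩
  | case4 a gs b ps hab hlt ih =>
    intro hg hp
    have hpb : ∀ x ∈ ps, b < x := (List.pairwise_cons.mp hp).1
    have hxa : ∀ x ∈ b :: ps, x ≠ a := by
      intro x hx
      rcases List.mem_cons.mp hx with h | h
      · exact h ▸ fun he => hab he.symm
      · exact ((hlt.trans (hpb x h)).ne')
    have h1 : (b :: ps).countP (fun x => decide (x = a) || decide (x ∈ gs))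
        = (b :: ps).countP (fun x => decide (x ∈ gs)) :=
      List.countP_congr (fun x hx => by simp [hxa x hx])
    have h2 : (b :: ps).countP (fun x => !decide (x = a) && !decide (x ∈ gs))
        = (b :: ps).countP (fun x => !decide (x ∈ gs)) :=
      List.countP_congr (fun x hx => by simp [hxa x hx])
    have hba : ¬ b = a := fun h => hab h.symm
    have hanp : a ∉ ps := fun h => (hxa a (List.mem_cons_of_mem b h)) rfl
    simp only [pvMerge, if_neg hab, if_pos hlt, ih (List.pairwise_cons.mp hg).2 hp]
    simp [h1, h2, hab, hanp]
  | case5 a gs b ps hab hnlt ih =>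
    intro hg hp
    have hblt : b < a := by
      rcases lt_trichotomy a b with h | h | h
      · exact absurd h hnlt
      · exact absurd h hab
      · exact h
    have hga : ∀ x ∈ gs, a < x := (List.pairwise_cons.mp hg).1
    have hxb : ∀ x ∈ a :: gs, x ≠ b := by
      intro x hx
      rcases List.mem_cons.mp hx with h | h
      · subst h; exact hab
      · exact ((hblt.trans (hga x h)).ne')
    have h3 : (a :: gs).countP (fun x => !decide (x = b) && !decide (x ∈ ps))
        = (a :: gs).countP (fun x => !decide (x ∈ ps)) :=
      List.countP_congr (fun x hx => by simp [hxb x hx])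
    have hbgs : b ∉ gs := fun h => (hxb b (List.mem_cons_of_mem a h)) rfl
    simp only [pvMerge, if_neg hab, if_neg hnlt, ih hg (List.pairwise_cons.mp hp).2]
    simp [h3, hblt.ne, hbgs]

-- counting over two duplicate-free lists with the same members and pointwise-equal predicates
lemma countP_transfer {s t : List String} (p q : String → Bool) (hs : s.Nodup) (ht : t.Nodup)
    (h : ∀ x, (x ∈ s ∧ p x = true) ↔ (x ∈ t ∧ q x = true)) :
    s.countP p = t.countP q := by
  rw [List.countP_eq_length_filter, List.countP_eq_length_filter]
  refine List.Perm.length_eq ?_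
  rw [List.perm_ext_iff_of_nodup (hs.filter p) (ht.filter q)]
  intro a
  simp only [List.mem_filter]
  exact h a

-- per-document: A's step function equals B's step function
lemma step_eq :
    (fun (acc : Int × Int × Int) (kv : String × List (String × List (List (String × String)))) =>
      let v := PySem.Dict.ofList kv.2
      let gold := v.getD "gold" []
      let pred := v.getD "pred" []
      let g : PySem.Set String := PySem.Set.ofList ((gold.filter pvKeep).map pvId)
      let p : PySem.Set String := PySem.Set.ofList ((pred.filter pvKeep).map pvId)
      (acc.1 + PySem.Set.len (PySem.Set.inter p g),
       acc.2.1 + PySem.Set.len (PySem.Set.diff p g),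
       acc.2.2 + PySem.Set.len (PySem.Set.diff g p)))
    = (fun (acc : Int × Int × Int) (kv : String × List (String × List (List (String × String)))) =>
      let v := PySem.Dict.ofList kv.2
      let gs := PySem.List.sorted (PySem.Set.ofList (((v.getD "gold" []).filter pvKeep).map pvId)) (fun x => x) false
      let ps := PySem.List.sorted (PySem.Set.ofList (((v.getD "pred" []).filter pvKeep).map pvId)) (fun x => x) false
      let r := pvMerge gs ps
      (acc.1 + r.1, acc.2.1 + r.2.1, acc.2.2 + r.2.2)) := by
  funext acc kv
  simp only []
  set G := ((((PySem.Dict.ofList kv.2).getD "gold" []).filter pvKeep).map pvId) with hG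
  set P := ((((PySem.Dict.ofList kv.2).getD "pred" []).filter pvKeep).map pvId) with hP
  set gs := PySem.List.sorted (PySem.Set.ofList G) (fun x => x) false with hgs
  set ps := PySem.List.sorted (PySem.Set.ofList P) (fun x => x) false with hps
  have hgsort : gs.Pairwise (· < ·) := PySem.List.sorted_ofList_pairwise_lt G
  have hpsort : ps.Pairwise (· < ·) := PySem.List.sorted_ofList_pairwise_lt P
  have hgperm : gs.Perm (PySem.Set.ofList G) := PySem.List.sorted_perm _ _ _
  have hpperm : ps.Perm (PySem.Set.ofList P) := PySem.List.sorted_perm _ _ _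
  have hgmem : ∀ x, x ∈ gs ↔ x ∈ G := fun x => (hgperm.mem_iff).trans (PySem.Set.mem_ofList _ _)
  have hpmem : ∀ x, x ∈ ps ↔ x ∈ P := fun x => (hpperm.mem_iff).trans (PySem.Set.mem_ofList _ _)
  rw [pvMerge_counts gs ps hgsort hpsort]
  have h1 : (PySem.Set.inter (PySem.Set.ofList P) (PySem.Set.ofList G)).length
      = ps.countP (fun x => decide (x ∈ gs)) := by
    rw [PySem.Set.inter, ← List.countP_eq_length_filter]
    refine countP_transfer _ _ (PySem.Set.nodup_ofList _) (hpsort.imp ne_of_lt) (fun x => ?_)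
    simp [PySem.Set.mem_ofList, PySem.Set.contains_eq_listContains, hgmem, hpmem]
  have h2 : (PySem.Set.diff (PySem.Set.ofList P) (PySem.Set.ofList G)).length
      = ps.countP (fun x => !decide (x ∈ gs)) := by
    rw [PySem.Set.diff, ← List.countP_eq_length_filter]
    refine countP_transfer _ _ (PySem.Set.nodup_ofList _) (hpsort.imp ne_of_lt) (fun x => ?_)
    simp [PySem.Set.mem_ofList, PySem.Set.contains_eq_listContains, hgmem, hpmem]
  have h3 : (PySem.Set.diff (PySem.Set.ofList G) (PySem.Set.ofList P)).length
      = gs.countP (fun x => !decide (x ∈ ps)) := by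
    rw [PySem.Set.diff, ← List.countP_eq_length_filter]
    refine countP_transfer _ _ (PySem.Set.nodup_ofList _) (hgsort.imp ne_of_lt) (fun x => ?_)
    simp [PySem.Set.mem_ofList, PySem.Set.contains_eq_listContains, hgmem, hpmem]
  simp only [PySem.Set.len, h1, h2, h3]

-- ===== VERDICT (by name: the statement is the Claim_ definition above) =====
theorem micro_counts_spec : Claim_equal_micro_counts := by
  intro per_doc _
  unfold Spec_micro_counts micro_counts micro_counts_alt
  rw [step_eq]
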